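-- pv_equiv track=rewrite | github.com/jirheee/algorithm | leetcode/roman_to_integer/solution.py | parse
-- ===== SOURCE A (Python) =====
-- from typing import List
--
-- def parse(s:str) -> List[str]:
--     l = []
--     while s != "":
--         if s[:2] in {"IV", "IX", "XL", "XC", "CD", "CM"} :
--             l.append(s[:2])
--             s = s[2:]
--         else:
--             l.append(s[0])
--             s = s[1:]
--
--     return l
-- ===== SOURCE B (Python) =====
-- import re
--
-- _TOKEN = re.compile(r'IV|IX|XL|XC|CD|CM|[\s\S]')
--
-- def parse(s: str):
--     return _TOKEN.findall(s)
-- ===== Notes on version B (the rewrite author's own statement) =====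
-- stated objective: idiomatic
-- what changed: Replaces the explicit while-loop over string slices with a single precompiled regex tokenization (re.findall with the six subtractive pairs first, then a catch-all single-character class), replicating the greedy pair-first scan declaratively.
import Mathlib
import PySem

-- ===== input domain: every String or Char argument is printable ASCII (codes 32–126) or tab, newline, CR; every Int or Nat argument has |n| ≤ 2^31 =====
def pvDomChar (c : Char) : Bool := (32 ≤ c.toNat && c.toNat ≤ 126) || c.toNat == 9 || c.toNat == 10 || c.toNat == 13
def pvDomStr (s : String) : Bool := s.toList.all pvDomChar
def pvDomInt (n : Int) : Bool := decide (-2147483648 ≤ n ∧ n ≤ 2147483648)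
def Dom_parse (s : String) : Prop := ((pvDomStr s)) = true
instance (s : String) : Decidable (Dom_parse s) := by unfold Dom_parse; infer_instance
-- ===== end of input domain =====

-- B replaces A's explicit slice-and-compare while-loop with a single regex tokenization
-- (re.findall of 'IV|IX|XL|XC|CD|CM|[\s\S]'), ported here by its exact greedy-alternation
-- semantics; equivalence of the RETURN values is proved for all strings.

-- ===== PORT A =====
-- the set literal {"IV","IX","XL","XC","CD","CM"} of A, on the code-point side
def romanPairs : List (List Char) := [['I','V'], ['I','X'], ['X','L'], ['X','C'], ['C','D'], ['C','M']]

-- the while-loop of A, on the code points of s, with accumulator l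
def parseLoop : List Char → List String → List String
  | [], l => l
  | c :: rest, l =>
      let two := PySem.List.slice (c :: rest) none (some 2)                    -- s[:2]
      if two ∈ romanPairs then
        parseLoop (PySem.List.slice (c :: rest) (some 2) none)
          (l ++ [String.ofList two])                                           -- append s[:2]; s = s[2:]
      else
        parseLoop rest (l ++ [String.ofList [c]])                              -- append s[0]; s = s[1:]
termination_by s _ => s.length
decreasing_by
  · have h : PySem.List.slice (c :: rest) (some (2 : Int)) none = rest.drop 1 := by
      simpa using PySem.List.slice_from_natCast (c :: rest) 2
    simp [h]
  · simp

def parse (s : String) : List String := parseLoop s.toList []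

-- ===== PORT B =====
-- the regex engine's attempt, at one position, of the six two-char alternatives in order
def pairToken (a b : Char) : Option (List Char) :=
  if a = 'I' ∧ b = 'V' then some ['I','V']
  else if a = 'I' ∧ b = 'X' then some ['I','X']
  else if a = 'X' ∧ b = 'L' then some ['X','L']
  else if a = 'X' ∧ b = 'C' then some ['X','C']
  else if a = 'C' ∧ b = 'D' then some ['C','D']
  else if a = 'C' ∧ b = 'M' then some ['C','M']
  else none

-- findall of r'IV|IX|XL|XC|CD|CM|[\s\S]': at each position greedily try a pair, else [\s\S]
def tokenize : List Char → List String
  | [] => []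
  | [a] => [String.ofList [a]]
  | a :: b :: rest =>
      match pairToken a b with
      | some t => String.ofList t :: tokenize rest
      | none => String.ofList [a] :: tokenize (b :: rest)
termination_by s => s.length

def parse_alt (s : String) : List String := tokenize s.toList

-- ===== PRECONDITION & SPEC =====
def Spec_parse (s : String) (out : List String) : Prop := out = parse_alt s
instance (s : String) (out : List String) : Decidable (Spec_parse s out) := by unfold Spec_parse; infer_instance

-- ===== CLAIM (what is proved, stated in full; the proofs are below) =====
def Claim_equal_parse : Prop := ∀ (s : String), Dom_parse s → Spec_parse s (parse s)

-- ===== LEMMAS AND PROOFS =====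

-- one-step unfolding of A's loop on a nonempty string
theorem parseLoop_cons (c : Char) (rest : List Char) (l : List String) :
    parseLoop (c :: rest) l =
      (if PySem.List.slice (c :: rest) none (some 2) ∈ romanPairs then
        parseLoop (PySem.List.slice (c :: rest) (some 2) none)
          (l ++ [String.ofList (PySem.List.slice (c :: rest) none (some 2))])
      else parseLoop rest (l ++ [String.ofList [c]])) := by
  simp only [parseLoop]

-- one-step unfolding of B's tokenizer on two or more characters
theorem tokenize_cons2 (a b : Char) (rest : List Char) :
    tokenize (a :: b :: rest) =
      (match pairToken a b with
        | some t => String.ofList t :: tokenize rest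
        | none => String.ofList [a] :: tokenize (b :: rest)) := by
  rw [tokenize]

-- a one-character prefix is never one of the two-character pair tokens
theorem single_not_pair (c : Char) : [c] ∉ romanPairs := by
  simp [romanPairs]

-- the pair-membership test of A agrees with B's pairToken
theorem pair_mem_iff (a b : Char) :
    (([a, b] : List Char) ∈ romanPairs) ↔ (pairToken a b).isSome := by
  unfold pairToken
  simp [romanPairs]
  split_ifs <;> simp_all

-- when the pair matches, A's token s[:2] equals B's token
theorem pair_token_eq (a b : Char) (t : List Char) (h : pairToken a b = some t) :
    [a, b] = t := by
  unfold pairToken at h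
  split_ifs at h <;> simp_all

-- loop invariant: A's accumulator loop computes l ++ B's tokenization
theorem parseLoop_eq (s : List Char) : ∀ l, parseLoop s l = l ++ tokenize s := by
  induction s using tokenize.induct with
  | case1 => intro l; simp [parseLoop, tokenize]
  | case2 a =>
      intro l
      have h2 : PySem.List.slice [a] (none : Option Int) (some 2) = [a] := by
        simpa using PySem.List.slice_to_natCast [a] 2
      rw [parseLoop_cons, h2, if_neg (single_not_pair a)]
      simp [parseLoop, tokenize]
  | case3 a b rest t hp ih =>
      intro l
      have hm : ([a, b] : List Char) ∈ romanPairs := (pair_mem_iff a b).mpr (by simp [hp])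
      have h2 : PySem.List.slice (a :: b :: rest) (none : Option Int) (some 2) = [a, b] := by
        simpa using PySem.List.slice_to_natCast (a :: b :: rest) 2
      have h3 : PySem.List.slice (a :: b :: rest) (some (2 : Int)) none = rest := by
        simpa using PySem.List.slice_from_natCast (a :: b :: rest) 2
      rw [parseLoop_cons, h2, if_pos hm, h3, tokenize_cons2, hp, ih,
        pair_token_eq a b t hp]
      simp
  | case4 a b rest hp ih =>
      intro l
      have hm : ([a, b] : List Char) ∉ romanPairs := by
        intro h; have := (pair_mem_iff a b).mp h; simp [hp] at this
      have h2 : PySem.List.slice (a :: b :: rest) (none : Option Int) (some 2) = [a, b] := by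
        simpa using PySem.List.slice_to_natCast (a :: b :: rest) 2
      rw [parseLoop_cons, h2, if_neg hm, tokenize_cons2, hp, ih]
      simp

-- ===== VERDICT (by name: the statement is the Claim_ definition above) =====
theorem parse_spec : Claim_equal_parse := by
  intro s _
  unfold Spec_parse parse parse_alt
  simpa using parseLoop_eq s.toList []
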